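-- pv_equiv track=rewrite | github.com/CmdrTaen/ED-Journal-to-Excel | edtslib/util.py | deinterleave
-- ===== SOURCE A (Python) =====
-- def deinterleave(val, maxbits):
--   out1 = 0
--   out2 = 0
--   for i in range(0, maxbits, 2):
--     out1 |= ((val >> i) & 1) << (i//2)
--   for i in range(1, maxbits, 2):
--     out2 |= ((val >> i) & 1) << (i//2)
--   return (out1, out2)
-- ===== SOURCE B (Python) =====
-- def deinterleave(val, maxbits):
--     v = val
--     out1 = 0
--     out2 = 0
--     p1 = 0
--     p2 = 0
--     toggle = False
--     for _ in range(maxbits):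
--         bit = v & 1
--         v >>= 1
--         if not toggle:
--             out1 |= bit << p1
--             p1 += 1
--         else:
--             out2 |= bit << p2
--             p2 += 1
--         toggle = not toggle
--     return (out1, out2)
-- ===== Notes on version B (the rewrite author's own statement) =====
-- stated objective: alternative
-- what changed: B replaces A's two separate index loops over even and odd bit positions by a single LSB-first shift-register pass: a local copy of val is shifted right once per step while a toggle routes each extracted low bit to one of two output-bit counters.
import Mathlib
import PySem

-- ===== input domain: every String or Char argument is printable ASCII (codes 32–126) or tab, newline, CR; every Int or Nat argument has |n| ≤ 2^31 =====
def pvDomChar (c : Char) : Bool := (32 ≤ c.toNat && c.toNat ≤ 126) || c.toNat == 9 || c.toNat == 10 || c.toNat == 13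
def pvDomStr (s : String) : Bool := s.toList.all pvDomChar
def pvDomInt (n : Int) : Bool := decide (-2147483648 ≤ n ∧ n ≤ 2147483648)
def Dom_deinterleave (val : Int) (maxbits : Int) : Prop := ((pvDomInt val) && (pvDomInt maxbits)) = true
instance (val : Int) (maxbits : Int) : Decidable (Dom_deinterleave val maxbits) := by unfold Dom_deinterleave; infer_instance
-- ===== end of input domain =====

-- B re-implements A's two even/odd index loops as one LSB-first shift-register pass with a
-- toggle and two output-bit counters; same cost, proved to return the same pair on all inputs.

-- ===== PORT A =====
-- literal transliteration: two foldl's over range(0, maxbits, 2) and range(1, maxbits, 2)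
def deinterleave (val : Int) (maxbits : Int) : Int × Int :=
  let out1 : Int := 0
  let out2 : Int := 0
  let out1 := (PySem.List.pyRange 0 maxbits 2).foldl
    (fun o1 i => PySem.Int.bor o1 (PySem.Int.band (val >>> i.toNat) 1 <<< (PySem.Int.floordiv i 2).toNat)) out1
  let out2 := (PySem.List.pyRange 1 maxbits 2).foldl
    (fun o2 i => PySem.Int.bor o2 (PySem.Int.band (val >>> i.toNat) 1 <<< (PySem.Int.floordiv i 2).toNat)) out2
  (out1, out2)

-- ===== PORT B =====
-- the loop body of Source B: state (v, out1, out2, p1, p2, toggle), one fuel step per iteration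
def pvAltLoop : Nat → Int → Int → Int → Nat → Nat → Bool → Int × Int
  | 0, _, o1, o2, _, _, _ => (o1, o2)
  | n+1, v, o1, o2, p1, p2, t =>
    let bit := PySem.Int.band v 1
    let v' := v >>> 1
    if t = false then pvAltLoop n v' (PySem.Int.bor o1 (bit <<< p1)) o2 (p1+1) p2 true
    else pvAltLoop n v' o1 (PySem.Int.bor o2 (bit <<< p2)) p1 (p2+1) false

def deinterleave_alt (val : Int) (maxbits : Int) : Int × Int :=
  pvAltLoop maxbits.toNat val 0 0 0 0 false

-- ===== PRECONDITION & SPEC =====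
def Spec_deinterleave (val : Int) (maxbits : Int) (out : Int × Int) : Prop := out = deinterleave_alt val maxbits
instance (val : Int) (maxbits : Int) (out : Int × Int) : Decidable (Spec_deinterleave val maxbits out) := by unfold Spec_deinterleave; infer_instance

-- ===== CLAIM (what is proved, stated in full; the proofs are below) =====
def Claim_equal_deinterleave : Prop := ∀ (val : Int) (maxbits : Int), Dom_deinterleave val maxbits → Spec_deinterleave val maxbits (deinterleave val maxbits)

-- ===== LEMMAS AND PROOFS =====

-- bit number k of v, and placing a bit at output position k (Int-valued shift amounts,
-- matching how the ports elaborate)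
def pvBit (v : Int) (k : Nat) : Int := PySem.Int.band (v >>> (k : Int)) 1
def pvPut (b : Int) (k : Nat) : Int := b <<< k

-- accumulate the even-position (resp. odd-position) bits of v, output bits starting at p
def pvFoldE (v : Int) (p : Nat) (n : Nat) (o : Int) : Int :=
  (List.range n).foldl (fun o j => PySem.Int.bor o (pvPut (pvBit v (2*j)) (p + j))) o

def pvFoldO (v : Int) (p : Nat) (n : Nat) (o : Int) : Int :=
  (List.range n).foldl (fun o j => PySem.Int.bor o (pvPut (pvBit v (2*j+1)) (p + j))) o

theorem pvFoldlCongr {α β : Type} (l : List β) {f g : α → β → α} (h : ∀ a b, f a b = g a b) (o : α) :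
    l.foldl f o = l.foldl g o := by
  have : f = g := by funext a b; exact h a b
  rw [this]

theorem pvBit_succ (v : Int) (k : Nat) : pvBit v (k+1) = pvBit (v >>> (1:Int)) k := by
  unfold pvBit
  have h : ((k+1 : Nat) : Int) = ((1:Nat) : Int) + ((k:Nat) : Int) := by push_cast; ring
  rw [h, Int.shiftRight_add', Nat.cast_one]

theorem pvFoldO_eq_foldE (v : Int) (p n : Nat) (o : Int) :
    pvFoldO v p n o = pvFoldE (v >>> (1:Int)) p n o := by
  unfold pvFoldO pvFoldE
  exact pvFoldlCongr _ (fun a j => by rw [pvBit_succ]) o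

theorem pvFoldE_succ (v : Int) (p m : Nat) (o : Int) :
    pvFoldE v p (m+1) o = pvFoldO (v >>> (1:Int)) (p+1) m (PySem.Int.bor o (PySem.Int.band v 1 <<< p)) := by
  unfold pvFoldE pvFoldO
  rw [List.range_succ_eq_map, List.foldl_cons, List.foldl_map]
  have hz : v >>> ((0:Nat) : Int) = v := by
    rw [Int.shiftRight_natCast_right, Int.shiftRight_zero]
  have h0 : PySem.Int.bor o (pvPut (pvBit v (2*0)) (p + 0)) = PySem.Int.bor o (PySem.Int.band v 1 <<< p) := by
    unfold pvBit pvPut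
    rw [show (2*0 : Nat) = 0 from rfl, hz, Nat.add_zero]
  rw [h0]
  exact pvFoldlCongr _ (fun a j => by
    rw [show 2*(Nat.succ j) = (2*j+1)+1 from by omega, pvBit_succ,
        show p + (Nat.succ j) = (p+1) + j from by omega]) _

-- the loop invariant of pvAltLoop, both toggle phases at once
theorem pvAltLoop_spec (n : Nat) : ∀ (v o1 o2 : Int) (p1 p2 : Nat),
    pvAltLoop n v o1 o2 p1 p2 false = (pvFoldE v p1 ((n+1)/2) o1, pvFoldO v p2 (n/2) o2)
    ∧ pvAltLoop n v o1 o2 p1 p2 true = (pvFoldO v p1 (n/2) o1, pvFoldE v p2 ((n+1)/2) o2) := by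
  induction n with
  | zero =>
    intro v o1 o2 p1 p2
    simp [pvAltLoop, pvFoldE, pvFoldO]
  | succ n ih =>
    intro v o1 o2 p1 p2
    constructor
    · show pvAltLoop n (v >>> 1) (PySem.Int.bor o1 (PySem.Int.band v 1 <<< p1)) o2 (p1+1) p2 true = _
      rw [(ih (v >>> 1) (PySem.Int.bor o1 (PySem.Int.band v 1 <<< p1)) o2 (p1+1) p2).2,
          show (n+1+1)/2 = n/2 + 1 from by omega, pvFoldE_succ, pvFoldO_eq_foldE,
          pvFoldO_eq_foldE v p2 ((n+1)/2) o2]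
    · show pvAltLoop n (v >>> 1) o1 (PySem.Int.bor o2 (PySem.Int.band v 1 <<< p2)) p1 (p2+1) false = _
      rw [(ih (v >>> 1) o1 (PySem.Int.bor o2 (PySem.Int.band v 1 <<< p2)) p1 (p2+1)).1,
          show (n+1+1)/2 = n/2 + 1 from by omega, pvFoldE_succ, pvFoldO_eq_foldE,
          pvFoldO_eq_foldE v p1 ((n+1)/2) o1]

theorem pvFloordivE (k : Nat) : PySem.Int.floordiv ((0:Int) + 2*((k:Nat):Int)) 2 = (k : Int) := by
  simp [PySem.Int.floordiv]

theorem pvFloordivO (k : Nat) : PySem.Int.floordiv ((1:Int) + 2*((k:Nat):Int)) 2 = (k : Int) := by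
  unfold PySem.Int.floordiv
  rw [show (1:Int) + 2*((k:Nat):Int) = 1 + ((k:Nat):Int)*2 from by ring,
      Int.add_mul_fdiv_right _ _ (by norm_num),
      show (1:Int).fdiv 2 = 0 from by decide]
  ring

-- A's even loop is pvFoldE, A's odd loop is pvFoldO
theorem pvA_even (val m : Int) :
    (PySem.List.pyRange 0 m 2).foldl
      (fun o1 i => PySem.Int.bor o1 (PySem.Int.band (val >>> i.toNat) 1 <<< (PySem.Int.floordiv i 2).toNat)) 0
    = pvFoldE val 0 (if 0 < m then ((m - 0 + 2 - 1) / 2).toNat else 0) 0 := by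
  rw [PySem.List.pyRange_of_pos 0 m (by norm_num), List.foldl_map]
  unfold pvFoldE
  exact pvFoldlCongr _ (fun a k => by
    rw [show ((0:Int) + 2*((k:Nat):Int)).toNat = 2*k from by omega, pvFloordivE,
        show ((k:Nat):Int).toNat = 0 + k from by omega]
    rfl) _

theorem pvA_odd (val m : Int) :
    (PySem.List.pyRange 1 m 2).foldl
      (fun o2 i => PySem.Int.bor o2 (PySem.Int.band (val >>> i.toNat) 1 <<< (PySem.Int.floordiv i 2).toNat)) 0
    = pvFoldO val 0 (if 1 < m then ((m - 1 + 2 - 1) / 2).toNat else 0) 0 := by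
  rw [PySem.List.pyRange_of_pos 1 m (by norm_num), List.foldl_map]
  unfold pvFoldO
  exact pvFoldlCongr _ (fun a k => by
    rw [show ((1:Int) + 2*((k:Nat):Int)).toNat = 2*k+1 from by omega, pvFloordivO,
        show ((k:Nat):Int).toNat = 0 + k from by omega]
    rfl) _

theorem pvCountE (m : Int) : (if 0 < m then ((m - 0 + 2 - 1) / 2).toNat else 0) = (m.toNat + 1)/2 := by
  split_ifs with h <;> omega

theorem pvCountO (m : Int) : (if 1 < m then ((m - 1 + 2 - 1) / 2).toNat else 0) = m.toNat/2 := by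
  split_ifs with h <;> omega

-- ===== VERDICT (by name: the statement is the Claim_ definition above) =====
theorem deinterleave_spec : Claim_equal_deinterleave := by
  intro val m _
  unfold Spec_deinterleave deinterleave_alt
  show ((PySem.List.pyRange 0 m 2).foldl
      (fun o1 i => PySem.Int.bor o1 (PySem.Int.band (val >>> i.toNat) 1 <<< (PySem.Int.floordiv i 2).toNat)) 0,
    (PySem.List.pyRange 1 m 2).foldl
      (fun o2 i => PySem.Int.bor o2 (PySem.Int.band (val >>> i.toNat) 1 <<< (PySem.Int.floordiv i 2).toNat)) 0)
    = pvAltLoop m.toNat val 0 0 0 0 false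
  rw [(pvAltLoop_spec m.toNat val 0 0 0 0).1, pvA_even, pvA_odd, pvCountE, pvCountO]
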